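-- pv_equiv track=rewrite | github.com/Tyler103/Skills | scripts/pptx_to_beamer.py | bullets_to_latex
-- ===== SOURCE A (Python) =====
-- def bullets_to_latex(items: list[tuple[int, str]]) -> list[str]:
--     """
--     Convert a list of (indent_level, latex_text) tuples into nested itemize blocks.
--
--     Example input:
--         [(0, "First bullet"), (1, "Sub-bullet"), (0, "Second bullet")]
--
--     Example output:
--         \\begin{itemize}
--           \\item First bullet
--           \\begin{itemize}
--             \\item Sub-bullet
--           \\end{itemize}
--           \\item Second bullet
--         \\end{itemize}
--
--     Args:
--         items: List of (level, text) pairs. Level 0 = outermost bullet.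
--
--     Returns:
--         List of LaTeX lines (not yet joined with newlines).
--     """
--     lines = []
--     depth = -1          # current nesting depth (-1 means no env is open yet)
--     open_envs = []      # stack of open itemize depths, used to close them in order
--
--     for level, text in items:
--         # Close environments that are deeper than the current bullet's level.
--         while depth > level:
--             lines.append("  " * depth + r"\end{itemize}")
--             open_envs.pop()
--             depth -= 1
--
--         # Open new environments until we reach the current bullet's depth.
--         while depth < level:
--             depth += 1
--             lines.append("  " * depth + r"\begin{itemize}")
--             open_envs.append(depth)
--
--         # Emit the bullet item, indented to match the current depth.
--         lines.append("  " * (depth + 1) + rf"\item {text}")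
--
--     # After all bullets are processed, close any environments still on the stack.
--     while open_envs:
--         d = open_envs.pop()
--         lines.append("  " * d + r"\end{itemize}")
--
--     return lines
-- ===== SOURCE B (Python) =====
-- def bullets_to_latex(items: list[tuple[int, str]]) -> list[str]:
--     """Pairwise closed form: each output chunk depends only on (previous level,
--     current level); no mutable depth counter and no explicit env stack."""
--     def chunk(prev, lv, text):
--         if lv < prev:
--             env = ["  " * d + "\\end{itemize}" for d in range(prev, lv, -1)]
--         else:
--             env = ["  " * d + "\\begin{itemize}" for d in range(prev + 1, lv + 1)]
--         return env + ["  " * (lv + 1) + "\\item " + text]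
--
--     levels = [lv for lv, _ in items]
--     prevs = [-1] + levels[:-1]
--     body = [line for prev, (lv, t) in zip(prevs, items) for line in chunk(prev, lv, t)]
--     last = levels[-1] if levels else -1
--     return body + ["  " * d + "\\end{itemize}" for d in range(last, -1, -1)]
-- ===== Notes on version B (the rewrite author's own statement) =====
-- stated objective: alternative
-- what changed: Replaced the stateful stack machine (mutable depth counter, open_envs stack, two inner while loops) by a stateless pairwise closed form: each output chunk is computed from (previous level, current level) alone via range comprehensions over zip([-1]+levels, items), plus one final closing range.
import Mathlib
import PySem

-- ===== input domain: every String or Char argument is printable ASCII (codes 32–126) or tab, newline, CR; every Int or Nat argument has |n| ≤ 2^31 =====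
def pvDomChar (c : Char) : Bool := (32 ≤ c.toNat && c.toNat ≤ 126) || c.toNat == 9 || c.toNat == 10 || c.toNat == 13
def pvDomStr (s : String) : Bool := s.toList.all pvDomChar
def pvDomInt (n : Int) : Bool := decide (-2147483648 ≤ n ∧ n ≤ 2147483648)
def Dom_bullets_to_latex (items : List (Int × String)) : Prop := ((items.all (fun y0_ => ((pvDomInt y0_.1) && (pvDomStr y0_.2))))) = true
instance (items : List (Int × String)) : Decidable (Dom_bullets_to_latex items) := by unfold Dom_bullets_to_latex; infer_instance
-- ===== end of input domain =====

-- B replaces A's stateful stack machine by a stateless pairwise closed form over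
-- zip([-1]+levels, items); same output lines, no speed claim (objective: alternative).

-- "  " * d (Python string repetition with an int count), shared text of both sources
def pvDup (d : Int) : List Char := PySem.List.pyRepeat "  ".toList d

def pvEndLine (d : Int) : String := String.ofList (pvDup d ++ "\\end{itemize}".toList)
def pvBeginLine (d : Int) : String := String.ofList (pvDup d ++ "\\begin{itemize}".toList)
def pvItemLine (d : Int) (t : String) : String := String.ofList (pvDup d ++ "\\item ".toList ++ t.toList)

-- ===== PORT A =====
-- `while depth > level: … open_envs.pop() …` (pop of an empty list = IndexError in
-- Python = `none` here; those inputs are outside Pre_, the loop stops there)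
def pvCloseLoop (level : Int) (lines : List String) (depth : Int) (envs : List Int) :
    List String × Int × List Int :=
  if _h : level < depth then
    match PySem.List.pop? envs (-1) with
    | none => (lines, depth, envs)
    | some (_, envs') => pvCloseLoop level (lines ++ [pvEndLine depth]) (depth - 1) envs'
  else (lines, depth, envs)
termination_by (depth - level).toNat
decreasing_by omega

-- `while depth < level: depth += 1; …`
def pvOpenLoop (level : Int) (lines : List String) (depth : Int) (envs : List Int) :
    List String × Int × List Int :=
  if _h : depth < level then
    pvOpenLoop level (lines ++ [pvBeginLine (depth + 1)]) (depth + 1) (envs ++ [depth + 1])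
  else (lines, depth, envs)
termination_by (level - depth).toNat
decreasing_by omega

-- `while open_envs: d = open_envs.pop(); …`
def pvFinalClose (lines : List String) (envs : List Int) : List String :=
  match h : PySem.List.pop? envs (-1) with
  | none => lines
  | some (d, envs') => pvFinalClose (lines ++ [pvEndLine d]) envs'
termination_by envs.length
decreasing_by
  have := PySem.List.length_of_pop?_eq_some envs h
  simp at this
  omega

def bullets_to_latex (items : List (Int × String)) : List String :=
  let st := items.foldl (fun st it =>
    let s1 := pvCloseLoop it.1 st.1 st.2.1 st.2.2
    let s2 := pvOpenLoop it.1 s1.1 s1.2.1 s1.2.2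
    (s2.1 ++ [pvItemLine (s2.2.1 + 1) it.2], s2.2.1, s2.2.2)) ([], -1, [])
  pvFinalClose st.1 st.2.2

-- ===== PORT B =====
def pvChunk (prev lv : Int) (text : String) : List String :=
  (if lv < prev then
     (PySem.List.pyRange prev lv (-1)).map pvEndLine
   else
     (PySem.List.pyRange (prev + 1) (lv + 1) 1).map pvBeginLine)
  ++ [pvItemLine (lv + 1) text]

def bullets_to_latex_alt (items : List (Int × String)) : List String :=
  let levels := items.map Prod.fst
  let prevs := -1 :: PySem.List.slice levels none (some (-1))
  let body := (prevs.zip items).flatMap (fun pr => pvChunk pr.1 pr.2.1 pr.2.2)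
  let last := match PySem.List.pyGet? levels (-1) with
    | some l => l
    | none => -1
  body ++ (PySem.List.pyRange last (-1) (-1)).map pvEndLine

-- ===== PRECONDITION & SPEC =====
-- Pre_ excludes exactly the inputs on which A raises IndexError (pop from an empty
-- stack): any item whose level is ≤ -2.
def Pre_bullets_to_latex (items : List (Int × String)) : Prop :=
  ∀ p ∈ items, -1 ≤ p.1
instance (items : List (Int × String)) : Decidable (Pre_bullets_to_latex items) := by
  unfold Pre_bullets_to_latex; infer_instance

def pvWitness_bullets_to_latex : (List (Int × String)) :=
  [(0, "First"), (2, "Deep"), (0, "Second")]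

def Spec_bullets_to_latex (items : List (Int × String)) (out : List String) : Prop :=
  out = bullets_to_latex_alt items
instance (items : List (Int × String)) (out : List String) : Decidable (Spec_bullets_to_latex items out) := by
  unfold Spec_bullets_to_latex; infer_instance

-- ===== CLAIM (what is proved, stated in full; the proofs are below) =====
def Claim_equal_bullets_to_latex : Prop := ∀ (items : List (Int × String)), Dom_bullets_to_latex items → Pre_bullets_to_latex items → Spec_bullets_to_latex items (bullets_to_latex items)

-- ===== LEMMAS AND PROOFS =====

-- the env stack A maintains when the current depth is d: [0, 1, …, d]
def pvStk (d : Int) : List Int := (List.range (d + 1).toNat).map Int.ofNat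

theorem pvStk_neg_one : pvStk (-1) = [] := rfl

theorem pvStk_pop (d : Int) (hd : 0 ≤ d) :
    PySem.List.pop? (pvStk d) (-1) = some (d, pvStk (d - 1)) := by
  have h3 : ((d.toNat : Int)) = d := Int.toNat_of_nonneg hd
  have hsplit : pvStk d = pvStk (d - 1) ++ [d] := by
    unfold pvStk
    rw [show (d + 1).toNat = d.toNat + 1 by omega, List.range_succ, List.map_append,
      show (d - 1 + 1).toNat = d.toNat by omega]
    simp [h3]
  rw [hsplit]
  exact PySem.List.pop?_last _ d

theorem pvStk_snoc (d : Int) (hd : -1 ≤ d) : pvStk d ++ [d + 1] = pvStk (d + 1) := by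
  unfold pvStk
  rw [show (d + 1 + 1).toNat = (d + 1).toNat + 1 by omega, List.range_succ, List.map_append]
  simp
  omega

theorem close_spec (level : Int) (hlev : -1 ≤ level) :
    ∀ (depth : Int) (lines : List String), level ≤ depth →
      pvCloseLoop level lines depth (pvStk depth) =
        (lines ++ (PySem.List.pyRange depth level (-1)).map pvEndLine, level, pvStk level) := by
  have key : ∀ (n : Nat) (depth : Int), (depth - level).toNat = n →
      ∀ (lines : List String), level ≤ depth →
      pvCloseLoop level lines depth (pvStk depth) =
        (lines ++ (PySem.List.pyRange depth level (-1)).map pvEndLine, level, pvStk level) := by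
    intro n
    induction n with
    | zero =>
      intro depth hn lines hld
      have hde : depth = level := by omega
      subst hde
      rw [pvCloseLoop, dif_neg (lt_irrefl depth),
        PySem.List.pyRange_neg_one_eq_nil (le_refl depth)]
      simp
    | succ n ih =>
      intro depth hn lines hld
      have hlt : level < depth := by omega
      have hd0 : 0 ≤ depth := by omega
      rw [pvCloseLoop, dif_pos hlt]
      split
      · next heq => rw [pvStk_pop depth hd0] at heq; cases heq
      · next d' envs' heq =>
        rw [pvStk_pop depth hd0] at heq
        injection heq with heq
        cases heq
        rw [ih (depth - 1) (by omega) _ (by omega)]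
        rw [PySem.List.pyRange_neg_one_cons hlt]
        simp
  intro depth lines hld
  exact key (depth - level).toNat depth rfl lines hld

theorem open_spec (level : Int) :
    ∀ (depth : Int) (lines : List String), -1 ≤ depth → depth ≤ level →
      pvOpenLoop level lines depth (pvStk depth) =
        (lines ++ (PySem.List.pyRange (depth + 1) (level + 1) 1).map pvBeginLine, level, pvStk level) := by
  have key : ∀ (n : Nat) (depth : Int), (level - depth).toNat = n →
      ∀ (lines : List String), -1 ≤ depth → depth ≤ level →
      pvOpenLoop level lines depth (pvStk depth) =
        (lines ++ (PySem.List.pyRange (depth + 1) (level + 1) 1).map pvBeginLine, level, pvStk level) := by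
    intro n
    induction n with
    | zero =>
      intro depth hn lines hd1 hdl
      have hde : depth = level := by omega
      subst hde
      rw [pvOpenLoop, dif_neg (lt_irrefl depth),
        PySem.List.pyRange_one_eq_nil (le_refl (depth + 1))]
      simp
    | succ n ih =>
      intro depth hn lines hd1 hdl
      have hlt : depth < level := by omega
      rw [pvOpenLoop, dif_pos hlt, pvStk_snoc depth hd1]
      rw [ih (depth + 1) (by omega) _ (by omega) (by omega)]
      rw [PySem.List.pyRange_one_cons (by omega : depth + 1 < level + 1)]
      simp
  intro depth lines hd1 hdl
  exact key (level - depth).toNat depth rfl lines hd1 hdl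

theorem final_spec : ∀ (p : Int), -1 ≤ p → ∀ (lines : List String),
    pvFinalClose lines (pvStk p) =
      lines ++ (PySem.List.pyRange p (-1) (-1)).map pvEndLine := by
  have key : ∀ (n : Nat) (p : Int), (p + 1).toNat = n → -1 ≤ p → ∀ (lines : List String),
      pvFinalClose lines (pvStk p) =
        lines ++ (PySem.List.pyRange p (-1) (-1)).map pvEndLine := by
    intro n
    induction n with
    | zero =>
      intro p hn hp lines
      have hpe : p = -1 := by omega
      subst hpe
      rw [pvStk_neg_one, PySem.List.pyRange_neg_one_eq_nil (le_refl (-1)), pvFinalClose]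
      split
      · simp
      · next d envs' heq =>
        cases hx : PySem.List.pyIdx? 0 (-1) <;> simp [PySem.List.pop?, hx] at heq
    | succ n ih =>
      intro p hn hp lines
      have hp0 : 0 ≤ p := by omega
      rw [pvFinalClose]
      split
      · next heq =>
        rw [pvStk_pop p hp0] at heq
        cases heq
      · next d envs' heq =>
        rw [pvStk_pop p hp0] at heq
        injection heq with heq
        cases heq
        rw [ih (p - 1) (by omega) (by omega)]
        rw [PySem.List.pyRange_neg_one_cons (by omega : (-1 : Int) < p)]
        simp
  intro p hp lines
  exact key (p + 1).toNat p rfl hp lines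

-- B's body, phrased as a recursion threading the previous level
def pvBody (p : Int) : List (Int × String) → List String
  | [] => []
  | (l, t) :: rest => pvChunk p l t ++ pvBody l rest

def pvLast (p : Int) : List (Int × String) → Int
  | [] => p
  | (l, _) :: rest => pvLast l rest

theorem pvLast_ge (items : List (Int × String)) (hpre : ∀ x ∈ items, -1 ≤ x.1) :
    ∀ (p : Int), -1 ≤ p → -1 ≤ pvLast p items := by
  induction items with
  | nil => intro p hp; exact hp
  | cons x rest ih =>
    intro p hp
    obtain ⟨l, t⟩ := x
    exact ih (fun y hy => hpre y (List.mem_cons_of_mem _ hy)) l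
      (hpre (l, t) List.mem_cons_self)

theorem step_spec (p l : Int) (t : String) (lines : List String)
    (hp : -1 ≤ p) (hl : -1 ≤ l) :
    (let s1 := pvCloseLoop l lines p (pvStk p)
     let s2 := pvOpenLoop l s1.1 s1.2.1 s1.2.2
     (s2.1 ++ [pvItemLine (s2.2.1 + 1) t], s2.2.1, s2.2.2)) =
    (lines ++ pvChunk p l t, l, pvStk l) := by
  by_cases hlp : l < p
  · rw [close_spec l hl p lines (le_of_lt hlp)]
    simp only []
    rw [pvOpenLoop, dif_neg (lt_irrefl l)]
    simp [pvChunk, if_pos hlp]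
  · rw [pvCloseLoop, dif_neg hlp]
    simp only []
    rw [open_spec l p lines hp (by omega)]
    simp [pvChunk, if_neg hlp]

theorem fold_spec (items : List (Int × String)) (hpre : ∀ x ∈ items, -1 ≤ x.1) :
    ∀ (p : Int), -1 ≤ p → ∀ (lines : List String),
      items.foldl (fun st it =>
        let s1 := pvCloseLoop it.1 st.1 st.2.1 st.2.2
        let s2 := pvOpenLoop it.1 s1.1 s1.2.1 s1.2.2
        (s2.1 ++ [pvItemLine (s2.2.1 + 1) it.2], s2.2.1, s2.2.2)) (lines, p, pvStk p) =
      (lines ++ pvBody p items, pvLast p items, pvStk (pvLast p items)) := by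
  induction items with
  | nil => intro p hp lines; simp [pvBody, pvLast]
  | cons x rest ih =>
    intro p hp lines
    obtain ⟨l, t⟩ := x
    have hl : -1 ≤ l := hpre (l, t) List.mem_cons_self
    rw [List.foldl_cons]
    have hstep := step_spec p l t lines hp hl
    simp only [] at hstep ⊢
    rw [hstep, ih (fun y hy => hpre y (List.mem_cons_of_mem _ hy)) l hl]
    simp [pvBody, pvLast, List.append_assoc]

theorem alt_body (items : List (Int × String)) : ∀ (p : Int),
    ((p :: (items.map Prod.fst).dropLast).zip items).flatMap
        (fun pr => pvChunk pr.1 pr.2.1 pr.2.2) = pvBody p items := by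
  induction items with
  | nil => intro p; simp [pvBody]
  | cons x rest ih =>
    intro p
    obtain ⟨l, t⟩ := x
    cases rest with
    | nil => simp [pvBody]
    | cons y ys =>
      have hne : ((y :: ys).map Prod.fst) ≠ [] := by simp
      rw [List.map_cons, List.dropLast_cons_of_ne_nil hne]
      rw [List.zip_cons_cons, List.flatMap_cons]
      rw [show pvBody p ((l, t) :: y :: ys) = pvChunk p l t ++ pvBody l (y :: ys) from rfl]
      rw [← ih l]

theorem pvLast_eq (items : List (Int × String)) : ∀ (p : Int),
    (items.map Prod.fst).getLastD p = pvLast p items := by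
  induction items with
  | nil => intro p; rfl
  | cons x rest ih =>
    intro p
    obtain ⟨l, t⟩ := x
    rw [List.map_cons, List.getLastD_cons]
    exact ih l

-- ===== VERDICT (by name: the statement is the Claim_ definition above) =====
theorem bullets_to_latex_spec : Claim_equal_bullets_to_latex := by
  intro items _hdom hpre
  unfold Spec_bullets_to_latex bullets_to_latex bullets_to_latex_alt
  simp only []
  have hstart : (([], -1, []) : List String × Int × List Int) = ([], -1, pvStk (-1)) := by
    rw [pvStk_neg_one]
  rw [hstart, fold_spec items hpre (-1) (by omega) []]
  have hlast : -1 ≤ pvLast (-1) items := pvLast_ge items hpre (-1) (by omega)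
  rw [final_spec (pvLast (-1) items) hlast]
  rw [PySem.List.slice_to_neg_one, alt_body items (-1)]
  rw [PySem.List.pyGet?_neg_one]
  have : (match (items.map Prod.fst).getLast? with
      | some l => l
      | none => (-1 : Int)) = ((items.map Prod.fst).getLast?).getD (-1) := by
    cases (items.map Prod.fst).getLast? <;> rfl
  rw [this, ← List.getLastD_eq_getLast?, pvLast_eq items (-1)]
  simp
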